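-- pv_equiv track=rewrite | github.com/Eric-Fithian/Adaptive-Net | archive/experiments/x0_underperforming_models/find_too_small_model.py | make_width_schedule
-- ===== SOURCE A (Python) =====
-- def make_width_schedule(n_features: int,
--                         max_width_cap: int = 1024) -> list[int]:
--     """
--     Powers-of-two up to max_width_cap.
--     """
--     widths = []
--     w = 2
--     while w <= max_width_cap:
--         widths.append(w)
--         w *= 2
--     return widths
-- ===== SOURCE B (Python) =====
-- def make_width_schedule(n_features: int,
--                         max_width_cap: int = 1024) -> list[int]:
--     """
--     Powers-of-two up to max_width_cap, by closed-form exponent count.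
--     """
--     if max_width_cap < 2:
--         return []
--     k = max_width_cap.bit_length() - 1  # largest k with 2**k <= max_width_cap
--     return [2 ** i for i in range(1, k + 1)]
-- ===== Notes on version B (the rewrite author's own statement) =====
-- stated objective: idiomatic
-- what changed: Replaces the doubling while-loop accumulator with a closed-form exponent count via bit_length and a range comprehension.
import Mathlib
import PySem

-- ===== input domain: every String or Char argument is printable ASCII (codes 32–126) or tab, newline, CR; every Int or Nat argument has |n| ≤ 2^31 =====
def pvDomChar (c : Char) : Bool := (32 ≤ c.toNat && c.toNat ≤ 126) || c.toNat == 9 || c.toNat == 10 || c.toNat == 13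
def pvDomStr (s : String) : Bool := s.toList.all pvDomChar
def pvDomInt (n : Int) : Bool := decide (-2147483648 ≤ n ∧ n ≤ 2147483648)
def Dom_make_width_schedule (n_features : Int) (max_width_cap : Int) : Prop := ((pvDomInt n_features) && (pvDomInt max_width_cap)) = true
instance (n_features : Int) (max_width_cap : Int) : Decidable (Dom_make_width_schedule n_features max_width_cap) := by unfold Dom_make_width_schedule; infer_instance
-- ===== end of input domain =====

-- B replaces A's doubling while-loop with a closed-form exponent count (bit_length) plus a range comprehension (idiomatic).


-- ===== PORT A =====
-- A's while loop: 0 < w is a termination guard only; A always runs the loop with w = 2, 4, 8, … > 0.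
def mwsLoop (cap : Int) (w : Int) (acc : List Int) : List Int :=
  if h : 0 < w ∧ w ≤ cap then mwsLoop cap (w * 2) (acc ++ [w]) else acc
termination_by (cap + 1 - w).toNat
decreasing_by
  have hw : w * 2 = w + w := by ring
  omega

def make_width_schedule (n_features : Int) (max_width_cap : Int) : List Int :=
  mwsLoop max_width_cap 2 []

-- ===== PORT B =====
-- bit_length of a nonnegative int is Nat.size; [2**i for i in range(1, k+1)]
def make_width_schedule_alt (n_features : Int) (max_width_cap : Int) : List Int :=
  if max_width_cap < 2 then []
  else
    let k : Int := (max_width_cap.toNat.size : Int) - 1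
    (PySem.List.pyRange 1 (k + 1) 1).map (fun i => (2 : Int) ^ i.toNat)

-- ===== PRECONDITION & SPEC =====
def Spec_make_width_schedule (n_features : Int) (max_width_cap : Int) (out : List Int) : Prop := out = make_width_schedule_alt n_features max_width_cap
instance (n_features : Int) (max_width_cap : Int) (out : List Int) : Decidable (Spec_make_width_schedule n_features max_width_cap out) := by unfold Spec_make_width_schedule; infer_instance

-- ===== CLAIM (what is proved, stated in full; the proofs are below) =====
def Claim_equal_make_width_schedule : Prop := ∀ (n_features : Int) (max_width_cap : Int), Dom_make_width_schedule n_features max_width_cap → Spec_make_width_schedule n_features max_width_cap (make_width_schedule n_features max_width_cap)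

-- ===== LEMMAS AND PROOFS =====

lemma mwsLoop_eq (cap : Int) (k : Nat)
    (hlo : (2 : Int) ^ k ≤ cap) (hhi : cap < (2 : Int) ^ (k + 1)) :
    ∀ (m j : Nat), j + m = k + 1 → 1 ≤ j → ∀ (acc : List Int),
      mwsLoop cap ((2 : Int) ^ j) acc
        = acc ++ (List.range' j m).map (fun i => (2 : Int) ^ i) := by
  intro m
  induction m with
  | zero =>
    intro j hj _ acc
    have hje : j = k + 1 := by omega
    rw [mwsLoop]
    rw [dif_neg]
    · simp
    · subst hje
      intro ⟨_, hle⟩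
      exact absurd hle (not_le.mpr hhi)
  | succ m ih =>
    intro j hj hj1 acc
    have hjk : j ≤ k := by omega
    have hle : (2 : Int) ^ j ≤ cap :=
      le_trans (pow_le_pow_right₀ (by norm_num) hjk) hlo
    rw [mwsLoop]
    rw [dif_pos ⟨by positivity, hle⟩]
    have hpow : (2 : Int) ^ j * 2 = (2 : Int) ^ (j + 1) := by ring
    rw [hpow, ih (j + 1) (by omega) (by omega) (acc ++ [(2 : Int) ^ j])]
    rw [List.range'_succ]
    simp

theorem make_width_schedule_spec : Claim_equal_make_width_schedule := by
  intro n_features cap _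
  unfold Spec_make_width_schedule make_width_schedule make_width_schedule_alt
  by_cases hlt : cap < 2
  · rw [if_pos hlt, mwsLoop, dif_neg (by omega)]
  · rw [if_neg hlt]
    have hcap2 : (2 : Int) ≤ cap := by omega
    set n : Nat := cap.toNat with hn
    have hcast : (n : Int) = cap := by omega
    have hn2 : 2 ≤ n := by omega
    have hs1 : 1 ≤ n.size := by
      exact Nat.size_pos.mpr (by omega)
    set k : Nat := n.size - 1 with hk
    have hks : k + 1 = n.size := by omega
    have hlo : (2 : Int) ^ k ≤ cap := by
      have : 2 ^ k ≤ n := Nat.lt_size.mp (by omega)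
      calc (2 : Int) ^ k = ((2 ^ k : Nat) : Int) := by push_cast; ring
        _ ≤ (n : Int) := by exact_mod_cast this
        _ = cap := hcast
    have hhi : cap < (2 : Int) ^ (k + 1) := by
      have : n < 2 ^ (k + 1) := by rw [hks]; exact Nat.lt_size_self n
      calc cap = (n : Int) := hcast.symm
        _ < ((2 ^ (k + 1) : Nat) : Int) := by exact_mod_cast this
        _ = (2 : Int) ^ (k + 1) := by push_cast; ring
    have hA : mwsLoop cap 2 [] = (List.range' 1 k).map (fun i => (2 : Int) ^ i) := by
      have := mwsLoop_eq cap k hlo hhi k 1 (by omega) (by omega) []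
      simpa using this
    rw [hA]
    -- evaluate B's comprehension
    have hki : ((n.size : Int) - 1) + 1 - 1 = (k : Int) := by omega
    simp only [PySem.List.pyRange_one, hki, Int.toNat_natCast,
      List.range'_eq_map_range, List.map_map]
    apply List.map_congr_left
    intro t _
    simp only [Function.comp]
    congr 1
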